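-- pv_equiv track=rewrite | github.com/dishant-dot-ai/jainsutra | scripture/Samaysaar/fix_cards.py | remove_key_principles
-- ===== SOURCE A (Python) =====
-- def remove_key_principles(html):
--     marker = '<!-- Key Principles -->'
--     pos = html.find(marker)
--     if pos == -1:
--         return html
--     # Find next <div after the comment
--     div_start = html.find('<div', pos)
--     if div_start == -1:
--         return html
--     # Find matching </div>
--     depth = 0
--     i = div_start
--     while i < len(html):
--         if html[i:i+4] == '<div':
--             depth += 1
--             i += 4
--         elif html[i:i+6] == '</div>':
--             depth -= 1
--             if depth == 0:
--                 end = i + 6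
--                 html = html[:pos] + html[end:]
--                 break
--             i += 6
--         else:
--             i += 1
--     return html
-- ===== SOURCE B (Python) =====
-- def remove_key_principles(html):
--     marker = '<!-- Key Principles -->'
--     pos = html.find(marker)
--     if pos == -1:
--         return html
--     i = html.find('<div', pos)
--     if i == -1:
--         return html
--     depth = 0
--     while True:
--         o = html.find('<div', i)
--         c = html.find('</div>', i)
--         if o != -1 and (c == -1 or o < c):
--             depth += 1
--             i = o + 4
--         elif c != -1:
--             depth -= 1
--             if depth == 0:
--                 return html[:pos] + html[c + 6:]
--             i = c + 6
--         else:
--             return html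
-- ===== Notes on version B (the rewrite author's own statement) =====
-- stated objective: alternative
-- what changed: Replaces the character-by-character scan (testing a 4-char and a 6-char slice at every position) with a token-jumping loop that uses str.find to leap directly from one div open/close tag occurrence to the next while maintaining the same depth counter.
import Mathlib
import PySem

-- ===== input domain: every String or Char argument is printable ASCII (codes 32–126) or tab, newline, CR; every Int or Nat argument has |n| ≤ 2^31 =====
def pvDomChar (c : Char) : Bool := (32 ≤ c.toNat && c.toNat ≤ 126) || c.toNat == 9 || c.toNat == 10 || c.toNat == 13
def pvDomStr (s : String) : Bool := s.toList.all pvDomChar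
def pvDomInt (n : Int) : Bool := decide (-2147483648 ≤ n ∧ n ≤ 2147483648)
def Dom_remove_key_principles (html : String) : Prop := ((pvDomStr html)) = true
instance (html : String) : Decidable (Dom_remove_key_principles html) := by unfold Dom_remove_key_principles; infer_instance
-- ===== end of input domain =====

-- B replaces A's character-by-character scan with a str.find token-jumping loop over the same depth counter; equal return value on every input (neither mutates its argument).

-- ===== PORT A =====
def rkpMarker : List Char := "<!-- Key Principles -->".toList

-- A's while-loop: i and pos are Python ints that are provably nonnegative at the call
-- site (results of find/findFrom that were checked ≠ -1), ported as Nat; slices via PySem.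
def rkpLoopA (s : List Char) (pos i : Nat) (depth : Int) : List Char :=
  if _h : i < s.length then
    if PySem.Chars.slice s (some (i : Int)) (some ((i : Int) + 4)) = "<div".toList then
      rkpLoopA s pos (i + 4) (depth + 1)
    else if PySem.Chars.slice s (some (i : Int)) (some ((i : Int) + 6)) = "</div>".toList then
      if depth - 1 = 0 then
        PySem.Chars.slice s none (some (pos : Int)) ++ PySem.Chars.slice s (some ((i : Int) + 6)) none
      else rkpLoopA s pos (i + 6) (depth - 1)
    else rkpLoopA s pos (i + 1) depth
  else s
termination_by s.length - i

def remove_key_principles (html : String) : String :=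
  let s := html.toList
  let pos := PySem.Chars.find s rkpMarker
  if pos = -1 then html
  else
    let div_start := PySem.Chars.findFrom s "<div".toList pos
    if div_start = -1 then html
    else String.ofList (rkpLoopA s pos.toNat div_start.toNat 0)

-- ===== PORT B =====
def rkpMarkerB : List Char := "<!-- Key Principles -->".toList
-- B's 'while True' loop; fuel is only a totality guard (i advances by ≥ 4 each
-- iteration, so fuel = length + 1 is never exhausted).
def rkpLoopB (s : List Char) (pos i : Nat) (fuel : Nat) (depth : Int) : List Char :=
  match fuel with
  | 0 => s
  | fuel + 1 =>
    let o := PySem.Chars.findFrom s "<div".toList (i : Int)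
    let c := PySem.Chars.findFrom s "</div>".toList (i : Int)
    if o ≠ -1 ∧ (c = -1 ∨ o < c) then
      rkpLoopB s pos (o.toNat + 4) fuel (depth + 1)
    else if c ≠ -1 then
      if depth - 1 = 0 then
        PySem.Chars.slice s none (some (pos : Int)) ++ PySem.Chars.slice s (some (c + 6)) none
      else rkpLoopB s pos (c.toNat + 6) fuel (depth - 1)
    else s

def remove_key_principles_alt (html : String) : String :=
  let s := html.toList
  let pos := PySem.Chars.find s rkpMarkerB
  if pos = -1 then html
  else
    let i := PySem.Chars.findFrom s "<div".toList pos
    if i = -1 then html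
    else String.ofList (rkpLoopB s pos.toNat i.toNat (s.length + 1) 0)

-- ===== PRECONDITION & SPEC =====
def Spec_remove_key_principles (html : String) (out : String) : Prop := out = remove_key_principles_alt html
instance (html : String) (out : String) : Decidable (Spec_remove_key_principles html out) := by unfold Spec_remove_key_principles; infer_instance

-- ===== CLAIM (what is proved, stated in full; the proofs are below) =====
def Claim_equal_remove_key_principles : Prop := ∀ (html : String), Dom_remove_key_principles html → Spec_remove_key_principles html (remove_key_principles html)

-- ===== LEMMAS AND PROOFS =====

-- find.go with start offset k: a shift of find.go with offset 0.
lemma rkp_go_shift (sub : List Char) (t : List Char) :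
    ∀ k : Nat, PySem.Chars.find.go sub t k =
      if PySem.Chars.find.go sub t 0 = -1 then -1 else (k : Int) + PySem.Chars.find.go sub t 0 := by
  induction t with
  | nil =>
    intro k
    simp only [PySem.Chars.find.go]
    split <;> simp
  | cons a t ih =>
    intro k
    simp only [PySem.Chars.find.go]
    by_cases hp : sub.isPrefixOf (a :: t) = true
    · simp [hp]
    · simp only [hp]
      rw [ih (k + 1), ih 1]
      by_cases hg : PySem.Chars.find.go sub t 0 = -1
      · simp [hg]
      · have hnn : -1 ≤ PySem.Chars.find.go sub t 0 := by
          have := PySem.Chars.neg_one_le_find t sub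
          simpa [PySem.Chars.find] using this
        simp only [if_neg hg]
        push_cast
        split <;> omega

lemma rkp_find_of_prefix {sub t : List Char} (h : sub <+: t) : PySem.Chars.find t sub = 0 := by
  cases t with
  | nil =>
    have : sub = [] := List.prefix_nil.mp h
    subst this
    simp [PySem.Chars.find, PySem.Chars.find.go]
  | cons a t =>
    have hp : sub.isPrefixOf (a :: t) = true := List.isPrefixOf_iff_prefix.mpr h
    simp [PySem.Chars.find, PySem.Chars.find.go, hp]

lemma rkp_find_cons {sub : List Char} {a : Char} {t : List Char} (h : ¬ sub <+: (a :: t)) :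
    PySem.Chars.find (a :: t) sub =
      if PySem.Chars.find t sub = -1 then -1 else 1 + PySem.Chars.find t sub := by
  have hp : sub.isPrefixOf (a :: t) = false := by
    rw [← Bool.not_eq_true, List.isPrefixOf_iff_prefix]; exact h
  simp only [PySem.Chars.find, PySem.Chars.find.go, hp]
  have := rkp_go_shift sub t 1
  simpa using this

lemma rkp_find_zero_prefix {sub t : List Char} (h : PySem.Chars.find t sub = 0) : sub <+: t := by
  have h0 : 0 ≤ PySem.Chars.find t sub := by omega
  have := (PySem.Chars.find_spec h0).1
  rw [h] at this
  simpa using this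

-- stepping findFrom past a non-matching position
lemma rkp_findFrom_step {s sub : List Char} {i : Nat} (hi : i < s.length)
    (h : ¬ sub <+: s.drop i) :
    PySem.Chars.findFrom s sub (i : Int) = PySem.Chars.findFrom s sub ((i + 1 : Nat) : Int) := by
  rw [PySem.Chars.findFrom_natCast s sub i (by omega),
      PySem.Chars.findFrom_natCast s sub (i + 1) (by omega)]
  have hdrop : s.drop i = s[i] :: s.drop (i + 1) := List.drop_eq_getElem_cons hi
  rw [hdrop] at h ⊢
  rw [rkp_find_cons h]
  have hnn := PySem.Chars.neg_one_le_find (s.drop (i + 1)) sub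
  by_cases hc : PySem.Chars.find (s.drop (i + 1)) sub = -1
  · simp [hc]
  · have h1 : ¬ (1 + PySem.Chars.find (s.drop (i + 1)) sub = -1) := by omega
    simp only [if_neg hc, if_neg h1]
    push_cast
    ring

lemma rkp_findFrom_of_prefix {s sub : List Char} {i : Nat} (hi : i ≤ s.length)
    (h : sub <+: s.drop i) : PySem.Chars.findFrom s sub (i : Int) = (i : Int) := by
  rw [PySem.Chars.findFrom_natCast s sub i hi, rkp_find_of_prefix h]
  simp

-- '<div' and '</div>' cannot both be prefixes of the same list
lemma rkp_not_both {t : List Char} (h4 : "<div".toList <+: t) (h6 : "</div>".toList <+: t) : False := by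
  rcases h4 with ⟨u, rfl⟩
  rcases h6 with ⟨v, hv⟩
  simp at hv

-- A's slice condition is a prefix condition
lemma rkp_sliceA_iff (s : List Char) (i n : Nat) (sub : List Char) (hn : sub.length = n) :
    (PySem.Chars.slice s (some (i : Int)) (some ((i : Int) + (n : Int))) = sub) ↔ sub <+: s.drop i := by
  rw [PySem.Chars.slice_eq_listSlice, PySem.List.slice_natCast_add]
  constructor
  · intro h
    exact h ▸ List.take_prefix n (s.drop i)
  · intro h
    have := List.prefix_iff_eq_take.mp h
    rw [hn] at this
    exact this.symm

-- the main loop equivalence, by strong induction on the remaining length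
lemma rkp_loop_eq (s : List Char) (pos : Nat) :
    ∀ n i d fuel, i ≤ s.length → s.length - i = n → s.length - i < fuel →
      rkpLoopB s pos i fuel d = rkpLoopA s pos i d := by
  intro n
  induction n using Nat.strong_induction_on with
  | _ n IH =>
    intro i d fuel hi hn hf
    obtain ⟨f, rfl⟩ : ∃ f, fuel = f + 1 := ⟨fuel - 1, by omega⟩
    by_cases hlt : i < s.length
    · -- characterize the two finds at i
      have h4iff : PySem.Chars.slice s (some (i : Int)) (some ((i : Int) + 4)) = "<div".toList
          ↔ "<div".toList <+: s.drop i := by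
        have := rkp_sliceA_iff s i 4 "<div".toList (by decide)
        simpa using this
      have h6iff : PySem.Chars.slice s (some (i : Int)) (some ((i : Int) + 6)) = "</div>".toList
          ↔ "</div>".toList <+: s.drop i := by
        have := rkp_sliceA_iff s i 6 "</div>".toList (by decide)
        simpa using this
      by_cases h4 : "<div".toList <+: s.drop i
      · -- open tag at i : both loops recurse at i+4 with depth+1
        have hlen4 : i + 4 ≤ s.length := by
          have := h4.length_le; simp at this; omega
        have ho : PySem.Chars.findFrom s "<div".toList (i : Int) = (i : Int) :=
          rkp_findFrom_of_prefix (by omega) h4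
        have hcond : (PySem.Chars.findFrom s "<div".toList (i : Int) ≠ -1 ∧
            (PySem.Chars.findFrom s "</div>".toList (i : Int) = -1 ∨
             PySem.Chars.findFrom s "<div".toList (i : Int) <
               PySem.Chars.findFrom s "</div>".toList (i : Int))) := by
          refine ⟨by rw [ho]; omega, ?_⟩
          by_cases hc : PySem.Chars.findFrom s "</div>".toList (i : Int) = -1
          · exact Or.inl hc
          · right
            rw [ho]
            rw [PySem.Chars.findFrom_natCast s "</div>".toList i (by omega)] at hc ⊢
            by_cases hcm : PySem.Chars.find (s.drop i) "</div>".toList = -1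
            · rw [if_pos hcm] at hc
              exact absurd rfl hc
            · rw [if_neg hcm]
              have hge : 0 ≤ PySem.Chars.find (s.drop i) "</div>".toList := by
                have := PySem.Chars.neg_one_le_find (s.drop i) "</div>".toList; omega
              have hne : PySem.Chars.find (s.drop i) "</div>".toList ≠ 0 := by
                intro h0
                exact rkp_not_both h4 (rkp_find_zero_prefix h0)
              omega
        simp only [rkpLoopB]
        rw [if_pos hcond, ho]
        rw [rkpLoopA]
        rw [dif_pos hlt, if_pos (h4iff.mpr h4)]
        have hto : ((i : Int).toNat + 4) = i + 4 := by simp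
        rw [hto]
        exact IH (s.length - (i + 4)) (by omega) (i + 4) (d + 1) f hlen4 rfl (by omega)
      · by_cases h6 : "</div>".toList <+: s.drop i
        · -- close tag at i
          have hlen6 : i + 6 ≤ s.length := by
            have := h6.length_le; simp at this; omega
          have hc : PySem.Chars.findFrom s "</div>".toList (i : Int) = (i : Int) :=
            rkp_findFrom_of_prefix (by omega) h6
          have hcond : ¬ (PySem.Chars.findFrom s "<div".toList (i : Int) ≠ -1 ∧
              (PySem.Chars.findFrom s "</div>".toList (i : Int) = -1 ∨
               PySem.Chars.findFrom s "<div".toList (i : Int) <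
                 PySem.Chars.findFrom s "</div>".toList (i : Int))) := by
            rintro ⟨ho, hor⟩
            rw [hc] at hor
            rcases hor with h | h
            · omega
            · rw [PySem.Chars.findFrom_natCast s _ i (by omega)] at ho h
              by_cases hom : PySem.Chars.find (s.drop i) "<div".toList = -1
              · rw [if_pos hom] at ho
                exact ho rfl
              · rw [if_neg hom] at h
                have hge : 0 ≤ PySem.Chars.find (s.drop i) "<div".toList := by
                  have := PySem.Chars.neg_one_le_find (s.drop i) "<div".toList; omega
                omega
          have hcne : ((i : Int) ≠ -1) := by omega
          simp only [rkpLoopB]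
          rw [if_neg hcond, hc, if_pos hcne]
          rw [rkpLoopA]
          rw [dif_pos hlt,
            if_neg (by rw [h4iff]; exact h4 :
              ¬ PySem.Chars.slice s (some (i : Int)) (some ((i : Int) + 4)) = "<div".toList),
            if_pos (h6iff.mpr h6)]
          by_cases hd : d - 1 = 0
          · rw [if_pos hd, if_pos hd]
          · rw [if_neg hd, if_neg hd]
            have hto : ((i : Int).toNat + 6) = i + 6 := by simp
            rw [hto]
            exact IH (s.length - (i + 6)) (by omega) (i + 6) (d - 1) f hlen6 rfl (by omega)
        · -- no tag at i : B's finds are unchanged at i+1; A steps to i+1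
          have ho := rkp_findFrom_step hlt h4
          have hc := rkp_findFrom_step hlt h6
          rw [rkpLoopA]
          simp only [hlt, dif_pos,
            (by rw [h4iff]; exact h4 : ¬ PySem.Chars.slice s (some (i : Int)) (some ((i : Int) + 4)) = "<div".toList), if_false,
            (by rw [h6iff]; exact h6 : ¬ PySem.Chars.slice s (some (i : Int)) (some ((i : Int) + 6)) = "</div>".toList), if_false]
          rw [← IH (s.length - (i + 1)) (by omega) (i + 1) d (f + 1) (by omega) rfl (by omega)]
          simp only [rkpLoopB]
          rw [ho, hc]
    · -- i = s.length : both return s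
      have hieq : i = s.length := by omega
      have hnone : ∀ sub : List Char, sub ≠ [] →
          PySem.Chars.findFrom s sub (i : Int) = -1 := by
        intro sub hsub
        rw [PySem.Chars.findFrom_natCast s sub i (by omega)]
        have : PySem.Chars.find (s.drop i) sub = -1 := by
          rw [hieq, List.drop_length, PySem.Chars.find_eq_neg_one_iff]
          intro hinf
          have := List.eq_nil_of_infix_nil hinf
          exact hsub this
        simp [this]
      have h1 : PySem.Chars.findFrom s "<div".toList (i : Int) = -1 := hnone _ (by decide)
      have h2 : PySem.Chars.findFrom s "</div>".toList (i : Int) = -1 := hnone _ (by decide)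
      simp only [rkpLoopB]
      rw [h1, h2]
      rw [rkpLoopA, dif_neg hlt]
      simp

-- ===== VERDICT (by name: the statement is the Claim_ definition above) =====
theorem remove_key_principles_spec : Claim_equal_remove_key_principles := by
  intro html _
  unfold Spec_remove_key_principles remove_key_principles remove_key_principles_alt
  rw [show rkpMarkerB = rkpMarker from rfl]
  set s := html.toList with hs
  by_cases hpos : PySem.Chars.find s rkpMarker = -1
  · simp [hpos]
  · simp only [hpos, if_false]
    have hposge : 0 ≤ PySem.Chars.find s rkpMarker := by
      have := PySem.Chars.neg_one_le_find s rkpMarker; omega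
    obtain ⟨p, hp⟩ : ∃ p : Nat, PySem.Chars.find s rkpMarker = (p : Int) :=
      ⟨_, (Int.toNat_of_nonneg hposge).symm⟩
    have hk : p ≤ s.length := by
      have := PySem.Chars.find_le_length s rkpMarker
      rw [hp] at this
      exact_mod_cast this
    rw [hp]
    by_cases hdv : PySem.Chars.findFrom s "<div".toList ((p : Nat) : Int) = -1
    · rw [if_pos hdv, if_pos hdv]
    · rw [if_neg hdv, if_neg hdv]
      obtain ⟨-, hpre, -⟩ := PySem.Chars.findFrom_natCast_spec s "<div".toList p hk hdv
      set j := (PySem.Chars.findFrom s "<div".toList ((p : Nat) : Int)).toNat with hjd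
      have h4len : ("<div".toList).length ≤ (s.drop j).length := hpre.length_le
      have hj : j ≤ s.length := by
        simp [List.length_drop] at h4len
        omega
      simp only [Int.toNat_natCast]
      congr 1
      exact (rkp_loop_eq s p (s.length - j) j 0 (s.length + 1) hj rfl (by omega)).symm
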